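-- pv_equiv track=rewrite | github.com/WAWLixiong/algorithm | 字符串比较算法/暴力解法.py | fun3
-- ===== SOURCE A (Python) =====
-- def fun3(s: str, p: str):
--     """严格按照n * m 进行判断的思想, 并且不需要将第一个字符串匹配完全"""
--     len_p = len(p)
--     len_s = len(s)
--     if len_p > len_s:
--         return -1
--     for i in range(0, len_s - len_p + 1):
--         for j, k in zip(range(i, len_p + i), range(len_p)):
--             if s[j] != p[k]:
--                 break
--             elif k == len_p - 1:
--                 return j - len_p + 1
--     return -1
-- ===== SOURCE B (Python) =====
-- def fun3(s: str, p: str):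
--     return s.find(p)
-- ===== Notes on version B (the rewrite author's own statement) =====
-- stated objective: idiomatic
-- what changed: Replaces the hand-written nested character-comparison loops with a single call to str.find, CPython's C-implemented two-way substring search.
-- intended difference: On an empty pattern p A returns -1 (its inner loop is empty so no match is ever reported) while B returns 0, the standard str.find convention that the empty string occurs at index 0, which is the intended answer for substring search. — e.g. on fun3("a", ""): A returns -1, B returns 0
import Mathlib
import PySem

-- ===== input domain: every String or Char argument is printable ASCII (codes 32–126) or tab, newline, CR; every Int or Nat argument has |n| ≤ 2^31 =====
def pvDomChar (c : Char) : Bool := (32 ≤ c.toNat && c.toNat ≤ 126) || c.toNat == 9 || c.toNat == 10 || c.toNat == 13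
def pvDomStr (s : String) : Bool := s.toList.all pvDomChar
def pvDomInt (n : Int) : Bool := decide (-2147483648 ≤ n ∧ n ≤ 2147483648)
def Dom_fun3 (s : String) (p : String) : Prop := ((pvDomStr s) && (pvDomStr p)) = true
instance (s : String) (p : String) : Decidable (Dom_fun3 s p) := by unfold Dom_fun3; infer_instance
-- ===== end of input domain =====

-- B replaces A's hand-written O(n*m) nested scanning loops with the idiomatic str.find
-- (differing only on the empty pattern, where A returns -1 and B returns the standard 0).


-- ===== PORT A =====
-- inner 'for j, k in zip(range(i, len_p + i), range(len_p))' loop; some r = early 'return r', none = loop ended/broke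
def fun3Inner (s p : String) (len_p : Int) : List (Int × Int) → Option Int
  | [] => none
  | (j, k) :: rest =>
    if PySem.Str.pyGet? s j ≠ PySem.Str.pyGet? p k then none
    else if k = len_p - 1 then some (j - len_p + 1)
    else fun3Inner s p len_p rest

-- outer 'for i in range(0, len_s - len_p + 1)' loop
def fun3Outer (s p : String) (len_p : Int) : List Int → Int
  | [] => -1
  | i :: rest =>
    match fun3Inner s p len_p ((PySem.List.pyRange i (len_p + i)).zip (PySem.List.pyRange 0 len_p)) with
    | some r => r
    | none => fun3Outer s p len_p rest

def fun3 (s : String) (p : String) : Int :=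
  let len_p : Int := PySem.Str.len p
  let len_s : Int := PySem.Str.len s
  if len_p > len_s then -1
  else fun3Outer s p len_p (PySem.List.pyRange 0 (len_s - len_p + 1))

-- ===== PORT B =====
def fun3_alt (s : String) (p : String) : Int := PySem.Str.find s p

-- ===== PRECONDITION & SPEC =====
-- On an empty pattern p A returns -1 (its inner loop is empty so no match is ever reported)
-- while B returns 0, the standard str.find convention that the empty string occurs at
-- index 0, which is the intended answer for substring search.
def D_fun3 (s : String) (p : String) : Prop := p = ""
instance (s : String) (p : String) : Decidable (D_fun3 s p) := by unfold D_fun3; infer_instance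
def Spec_fun3 (s : String) (p : String) (out : Int) : Prop := ¬ D_fun3 s p → out = fun3_alt s p
instance (s : String) (p : String) (out : Int) : Decidable (Spec_fun3 s p out) := by unfold Spec_fun3; infer_instance
def pvDiffWitness_fun3 : String × String := ("a", "")
def pvDiffWitnessOut_fun3 : Int × Int := (-1, 0)

-- ===== CLAIM (what is proved, stated in full; the proofs are below) =====
def Claim_unchanged_fun3 : Prop := ∀ (s : String) (p : String), Dom_fun3 s p → Spec_fun3 s p (fun3 s p)
def Claim_changed_fun3 : Prop := Dom_fun3 (pvDiffWitness_fun3.1) (pvDiffWitness_fun3.2) ∧ D_fun3 (pvDiffWitness_fun3.1) (pvDiffWitness_fun3.2) ∧ fun3 (pvDiffWitness_fun3.1) (pvDiffWitness_fun3.2) = pvDiffWitnessOut_fun3.1 ∧ fun3_alt (pvDiffWitness_fun3.1) (pvDiffWitness_fun3.2) = pvDiffWitnessOut_fun3.2 ∧ pvDiffWitnessOut_fun3.1 ≠ pvDiffWitnessOut_fun3.2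
def Claim_exact_fun3 : Prop := ∀ (s : String) (p : String), Dom_fun3 s p → D_fun3 s p → fun3 s p ≠ fun3_alt s p

-- ===== LEMMAS AND PROOFS =====

-- A's inner loop over the zipped index pairs matches p[k:] against s[i+k:], one char at a time.
lemma inner_aux (s p : String) (d : Nat) :
    ∀ (i k : Nat), k + d = p.toList.length → 0 < d → i + p.toList.length ≤ s.toList.length →
    fun3Inner s p (p.toList.length : Int)
      ((PySem.List.pyRange ((i + k : Nat) : Int) ((p.toList.length : Int) + (i : Int))).zip
        (PySem.List.pyRange ((k : Nat) : Int) (p.toList.length : Int)))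
      = if (s.toList.drop (i + k)).take d = p.toList.drop k then some (i : Int) else none := by
  induction d with
  | zero => intro i k _ h0 _; omega
  | succ d ih =>
    intro i k hkd _ hlen
    have hkn : k < p.toList.length := by omega
    have hik : i + k < s.toList.length := by omega
    -- both ranges are nonempty; peel one element off each
    have hr1 : PySem.List.pyRange ((i + k : Nat) : Int) ((p.toList.length : Int) + (i : Int))
        = ((i + k : Nat) : Int) :: PySem.List.pyRange (((i + k : Nat) : Int) + 1) ((p.toList.length : Int) + (i : Int)) :=
      PySem.List.pyRange_one_cons (by omega)
    have hr2 : PySem.List.pyRange ((k : Nat) : Int) (p.toList.length : Int)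
        = ((k : Nat) : Int) :: PySem.List.pyRange (((k : Nat) : Int) + 1) (p.toList.length : Int) :=
      PySem.List.pyRange_one_cons (by omega)
    have hgs : PySem.Str.pyGet? s ((i + k : Nat) : Int) = some (s.toList[i + k]'hik) := by
      rw [PySem.Str.pyGet?_natCast]; exact List.getElem?_eq_getElem hik
    have hgp : PySem.Str.pyGet? p ((k : Nat) : Int) = some (p.toList[k]'hkn) := by
      rw [PySem.Str.pyGet?_natCast]; exact List.getElem?_eq_getElem hkn
    have hds : s.toList.drop (i + k) = s.toList[i + k]'hik :: s.toList.drop (i + k + 1) :=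
      List.drop_eq_getElem_cons hik
    have hdp : p.toList.drop k = p.toList[k]'hkn :: p.toList.drop (k + 1) :=
      List.drop_eq_getElem_cons hkn
    rw [hr1, hr2]
    by_cases hc : s.toList[i + k]'hik = p.toList[k]'hkn
    · -- heads agree
      by_cases hlast : k + 1 = p.toList.length
      · -- last position: the port returns, d = 0 is impossible here unless d = 0
        have hd0 : d = 0 := by omega
        subst hd0
        simp only [List.zip_cons_cons, fun3Inner, hgs, hgp, hc, ne_eq, not_true_eq_false, if_false]
        have hkeq : ((k : Nat) : Int) = (p.toList.length : Int) - 1 := by omega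
        rw [if_pos hkeq, hds, hdp, hc]
        simp only [List.take_succ_cons, List.take_zero]
        have : ((i + k : Nat) : Int) - (p.toList.length : Int) + 1 = (i : Int) := by
          push_cast; omega
        rw [this]
        have hdrop : p.toList.drop (k + 1) = [] := by
          rw [List.drop_eq_nil_iff]; omega
        rw [hdrop, if_pos rfl]
      · -- not the last position: recurse
        have hd1 : 0 < d := by omega
        simp only [List.zip_cons_cons, fun3Inner, hgs, hgp, hc, ne_eq, not_true_eq_false, if_false]
        have hkne : ¬ ((k : Nat) : Int) = (p.toList.length : Int) - 1 := by omega
        rw [if_neg hkne]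
        have e1 : (((i + k : Nat) : Int) + 1) = ((i + (k + 1) : Nat) : Int) := by push_cast; omega
        have e2 : (((k : Nat) : Int) + 1) = (((k + 1) : Nat) : Int) := by push_cast; omega
        rw [e1, e2, ih i (k + 1) (by omega) hd1 hlen]
        have e3 : i + (k + 1) = i + k + 1 := by omega
        rw [e3]
        have hcond : ((s.toList.drop (i + k)).take (d + 1) = p.toList.drop k)
            ↔ ((s.toList.drop (i + k + 1)).take d = p.toList.drop (k + 1)) := by
          rw [hds, hdp, List.take_succ_cons, List.cons_eq_cons]
          exact ⟨fun h => h.2, fun h => ⟨hc, h⟩⟩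
        by_cases ht : (s.toList.drop (i + k + 1)).take d = p.toList.drop (k + 1)
        · rw [if_pos ht, if_pos (hcond.mpr ht)]
        · rw [if_neg ht, if_neg (fun h => ht (hcond.mp h))]
    · -- heads differ: both sides give none
      simp only [List.zip_cons_cons, fun3Inner, hgs, hgp, ne_eq, Option.some.injEq, hc,
        not_false_eq_true, if_true]
      have hcond : ¬ ((s.toList.drop (i + k)).take (d + 1) = p.toList.drop k) := by
        rw [hds, hdp, List.take_succ_cons, List.cons_eq_cons]
        exact fun h => hc h.1
      rw [if_neg hcond]

-- At k = 0 the inner loop decides whether p is a prefix of s from position i.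
lemma inner_full (s p : String) (i : Nat) (hn : p.toList.length ≠ 0)
    (hle : i + p.toList.length ≤ s.toList.length) :
    fun3Inner s p (p.toList.length : Int)
      ((PySem.List.pyRange (i : Int) ((p.toList.length : Int) + (i : Int))).zip
        (PySem.List.pyRange 0 (p.toList.length : Int)))
      = if p.toList <+: s.toList.drop i then some (i : Int) else none := by
  have h := inner_aux s p p.toList.length i 0 (by omega) (by omega) hle
  simp only [Nat.add_zero, Nat.cast_zero, List.drop_zero] at h
  rw [h]
  have hiff : (s.toList.drop i).take p.toList.length = p.toList ↔ p.toList <+: s.toList.drop i := by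
    constructor
    · intro he; rw [List.prefix_iff_eq_take]; exact he.symm
    · intro hpre; exact (List.prefix_iff_eq_take.mp hpre).symm
  by_cases hc : p.toList <+: s.toList.drop i
  · rw [if_pos (hiff.mpr hc), if_pos hc]
  · rw [if_neg (fun he => hc (hiff.mp he)), if_neg hc]

-- outer loop returns -1 when no admissible start position matches
lemma outer_none (s p : String) (K : Nat)
    (hn : p.toList.length ≠ 0) (hK : K + p.toList.length = s.toList.length) :
    ∀ (c : Nat) (a : Nat), a + c = K + 1 →
    (∀ i : Nat, a ≤ i → i ≤ K → ¬ p.toList <+: s.toList.drop i) →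
    fun3Outer s p (p.toList.length : Int) (PySem.List.pyRange (a : Int) ((K : Int) + 1)) = -1 := by
  intro c
  induction c with
  | zero =>
    intro a ha _
    have : PySem.List.pyRange (a : Int) ((K : Int) + 1) = [] := by
      simp [PySem.List.pyRange]; omega
    rw [this]; rfl
  | succ c ih =>
    intro a ha hno
    have haK : a ≤ K := by omega
    rw [PySem.List.pyRange_one_cons (by omega)]
    rw [fun3Outer, inner_full s p a hn (by omega)]
    rw [if_neg (hno a le_rfl haK)]
    have e1 : ((a : Int) + 1) = (((a + 1) : Nat) : Int) := by push_cast; ring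
    rw [e1]
    exact ih (a + 1) (by omega) (fun i h1 h2 => hno i (by omega) h2)

-- outer loop returns the first matching start position
lemma outer_finds (s p : String) (K : Nat) (m : Nat)
    (hn : p.toList.length ≠ 0) (hK : K + p.toList.length = s.toList.length)
    (hm : m ≤ K) (hPm : p.toList <+: s.toList.drop m) :
    ∀ (c : Nat) (a : Nat), a + c = K + 1 → a ≤ m →
    (∀ i : Nat, a ≤ i → i < m → ¬ p.toList <+: s.toList.drop i) →
    fun3Outer s p (p.toList.length : Int) (PySem.List.pyRange (a : Int) ((K : Int) + 1)) = (m : Int) := by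
  intro c
  induction c with
  | zero => intro a ha ham _; omega
  | succ c ih =>
    intro a ha ham hmin
    rw [PySem.List.pyRange_one_cons (by omega)]
    rw [fun3Outer, inner_full s p a hn (by omega)]
    by_cases hc : a = m
    · subst hc; rw [if_pos hPm]
    · rw [if_neg (hmin a le_rfl (by omega))]
      have e1 : ((a : Int) + 1) = (((a + 1) : Nat) : Int) := by push_cast; ring
      rw [e1]
      exact ih (a + 1) (by omega) (by omega) (fun i h1 h2 => hmin i (by omega) h2)

-- A with the empty pattern always returns -1 (the zipped inner range is empty)
lemma outer_empty_pattern (s : String) (l : List Int) : fun3Outer s "" 0 l = -1 := by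
  induction l with
  | nil => rfl
  | cons i rest ih =>
      simpa [fun3Outer, PySem.List.pyRange, fun3Inner] using ih

lemma fun3_empty (s : String) : fun3 s "" = -1 := by
  simp [fun3, PySem.Str.len, outer_empty_pattern]

lemma main_eq (s p : String) (hp : p ≠ "") : fun3 s p = PySem.Str.find s p := by
  have hn : p.toList.length ≠ 0 := by
    intro h
    apply hp
    have h2 : p.toList = "".toList := by simpa using List.length_eq_zero_iff.mp h
    exact String.toList_inj.mp h2
  rw [PySem.Str.find_eq]
  by_cases hbig : s.toList.length < p.toList.length
  · -- pattern longer than the text: both give -1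
    have h1 : fun3 s p = -1 := by
      rw [fun3]
      simp only [PySem.Str.len_eq]
      rw [if_pos (by omega)]
    have h2 : ¬ p.toList <:+: s.toList := fun h => by
      have := h.length_le; omega
    rw [h1, (PySem.Chars.find_eq_neg_one_iff _ _).mpr h2]
  · rw [not_lt] at hbig
    set K : Nat := s.toList.length - p.toList.length with hKdef
    have hK : K + p.toList.length = s.toList.length := by omega
    have hfe : fun3 s p
        = fun3Outer s p (p.toList.length : Int) (PySem.List.pyRange ((0 : Nat) : Int) ((K : Int) + 1)) := by
      rw [fun3]
      simp only [PySem.Str.len_eq]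
      rw [if_neg (by omega)]
      have : ((s.toList.length : Int) - (p.toList.length : Int) + 1) = ((K : Int) + 1) := by
        push_cast; omega
      rw [this]; norm_num
    by_cases hin : p.toList <:+: s.toList
    · -- a match exists: both return the first occurrence
      have hnn : 0 ≤ PySem.Chars.find s.toList p.toList :=
        (PySem.Chars.find_nonneg_iff _ _).mpr hin
      obtain ⟨hPm, hminm⟩ := PySem.Chars.find_spec hnn
      set m : Nat := (PySem.Chars.find s.toList p.toList).toNat with hmdef
      have hmK : m ≤ K := by
        have hlen := hPm.length_le
        rw [List.length_drop] at hlen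
        omega
      rw [hfe, outer_finds s p K m hn hK hmK hPm (K + 1) 0 (by omega) (by omega)
        (fun i _ h2 => hminm i h2)]
      omega
    · -- no match: both return -1
      have hno : ∀ i : Nat, ¬ p.toList <+: s.toList.drop i := by
        intro i hpre
        exact hin (((PySem.Chars.isIn_iff_infix _ _).mp
          ((PySem.Chars.exists_prefix_drop_iff_isIn _ _).mp ⟨i, hpre⟩)))
      rw [hfe, outer_none s p K hn hK (K + 1) 0 (by omega) (fun i _ _ => hno i),
        (PySem.Chars.find_eq_neg_one_iff _ _).mpr hin]

-- ===== VERDICT (by name: the statement is the Claim_ definition above) =====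
theorem fun3_spec : Claim_unchanged_fun3 := by
  intro s p _ hD
  have hp : p ≠ "" := fun h => hD h
  simpa [Spec_fun3, fun3_alt] using main_eq s p hp

theorem fun3_changed : Claim_changed_fun3 := by unfold Claim_changed_fun3; decide

theorem fun3_tight : Claim_exact_fun3 := by
  intro s p _ hD
  subst hD
  rw [fun3_empty]
  have h0 : fun3_alt s "" = 0 := by
    simp [fun3_alt, PySem.Str.find_eq, PySem.Chars.find_nil]
  rw [h0]; decide
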